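-- pv_equiv track=rewrite | github.com/humancipher/Programming_Contest | Programming_Contest/AtCoder/ABC/ABC_100-199/ABC_100-109/ABC_102/ABC_102_C.py | solve
-- ===== SOURCE A (Python) =====
-- from itertools import accumulate
-- from bisect import bisect_left
--
-- INF = 1 << 60
--
-- def solve(A,N):
--     for i in range(N):
--         A[i] -= (i+1)
--     A.sort()
--     if A[0] < 0:
--         buf = A[0]
--         for i in range(N):
--             A[i] -= buf
--
--     B = set()
--     for a in A:
--         B.add(a)
--     A_rui = list(accumulate(A))
--     ans = INF
--     for b in B:
--         i = bisect_left(A,b)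
--         if i > 0:
--             ans = min(ans,A_rui[N-1] - 2*A_rui[i-1] + b*(2*i-N))
--         else:
--             ans = min(ans,A_rui[N-1]- b*N)
--     return ans
-- ===== SOURCE B (Python) =====
-- INF = 1 << 60
--
-- def solve(A, N):
--     for i in range(N):
--         A[i] -= (i + 1)
--     A.sort()
--     if A[0] < 0:
--         buf = A[0]
--         for i in range(N):
--             A[i] -= buf
--     # prefix sums once, then one scan: the cost of aligning everything to
--     # the value at position j is total - 2*(sum left of j) + A[j]*(2*j - N),
--     # and every occurrence of a value yields the same cost, so each position
--     # is scored directly -- no value set and no binary search.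
--     P = []
--     s = 0
--     for a in A:
--         s += a
--         P.append(s)
--     total = P[N - 1]
--     best = INF
--     left = 0
--     for j, b in enumerate(A):
--         best = min(best, total - 2 * left + b * (2 * j - N))
--         left += b
--     return best
-- ===== Notes on version B (the rewrite author's own statement) =====
-- stated objective: simpler
-- what changed: B replaces the value set, the accumulate table and the per-distinct-value bisect_left scan by prefix sums built in one loop and a single uniform-formula scan that scores every position (duplicates of a value score identically); Pre_ excludes inputs where the conditional shift touches only a proper prefix (0 < N < len(A) with a negative sorted minimum): there the list handed to bisect_left can be unsorted and A's value is an artefact of binary search on unsorted data.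
-- outside the precondition, e.g. on solve([0, -3], 1): A returns 1, B returns -1; on solve([3, 4, -1], 2): A returns 3, B returns 1
import Mathlib
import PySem

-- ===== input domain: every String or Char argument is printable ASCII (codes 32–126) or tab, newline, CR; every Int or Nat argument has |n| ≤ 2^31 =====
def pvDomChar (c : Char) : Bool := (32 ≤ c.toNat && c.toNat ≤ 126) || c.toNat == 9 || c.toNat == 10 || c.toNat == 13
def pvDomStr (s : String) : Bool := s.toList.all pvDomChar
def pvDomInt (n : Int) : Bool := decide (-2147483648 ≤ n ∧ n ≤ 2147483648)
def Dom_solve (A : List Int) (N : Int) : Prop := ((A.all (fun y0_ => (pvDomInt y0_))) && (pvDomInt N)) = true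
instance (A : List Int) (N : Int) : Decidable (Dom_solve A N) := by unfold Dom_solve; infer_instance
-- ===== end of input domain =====

-- B keeps A's in-place list mutation and replaces A's value set, accumulate table and
-- per-distinct-value bisect scan by prefix sums built in one loop and a single uniform
-- scan over all positions.  Both Pythons mutate the argument list identically; the
-- equivalence is about the return value.

def INF : Int := 1 <<< 60

-- shared preprocessing, verbatim identical in both Python sources:
--   for i in range(N): A[i] -= (i+1);  A.sort();  if A[0] < 0: for i in range(N): A[i] -= A[0]
-- each range(N) loop is rendered as a per-index conditional map (exact for N ≤ len(A); for
-- N > len(A) Python raises IndexError, excluded by Pre_); on an empty list Python raises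
-- IndexError at A[0] (excluded by Pre_) — the `none` arm of shiftPrefix is dead there.
def step1 (A : List Int) (N : Int) : List Int :=
  (PySem.List.enumerate A 0).map (fun p => if p.1 < N then p.2 - (p.1 + 1) else p.2)

def shiftPrefix (C : List Int) (N : Int) : List Int :=
  match PySem.List.pyGet? C 0 with
  | some c0 =>
      if c0 < 0 then (PySem.List.enumerate C 0).map (fun p => if p.1 < N then p.2 - c0 else p.2)
      else C
  | none => C

def prep (A : List Int) (N : Int) : List Int :=
  shiftPrefix (PySem.List.sorted (step1 A N) (fun x => x) false) N

-- ===== PORT A =====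
-- value set / accumulate table / per-distinct-value loop with bisect_left.
def solve (A : List Int) (N : Int) : Int :=
  let C := prep A N
  let B : PySem.Set Int := C.foldl PySem.Set.add (PySem.Set.empty)
  let Arui := (C.scanl (· + ·) 0).tail
  B.foldl (fun ans b =>
    let i : Int := (PySem.List.bisectLeft C b : Nat)
    if i > 0 then
      min ans (PySem.List.pyGetD Arui (N - 1) 0 - 2 * PySem.List.pyGetD Arui (i - 1) 0 + b * (2 * i - N))
    else
      min ans (PySem.List.pyGetD Arui (N - 1) 0 - b * N)) INF

-- ===== PORT B =====
-- Source B's scan body (for j, b in enumerate(A): best = min(best, …); left += b)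
def stepB (T N : Int) (st : Int × Int) (p : Int × Int) : Int × Int :=
  (min st.1 (T - 2 * st.2 + p.2 * (2 * p.1 - N)), st.2 + p.2)

-- prefix sums built by one loop (state = (s, P)), total = P[N-1], then one scan
def solve_alt (A : List Int) (N : Int) : Int :=
  let C := prep A N
  let sp := C.foldl (fun st a => (st.1 + a, st.2 ++ [st.1 + a])) ((0 : Int), ([] : List Int))
  let total := PySem.List.pyGetD sp.2 (N - 1) 0
  ((PySem.List.enumerate C 0).foldl (stepB total N) (INF, 0)).1

-- ===== PRECONDITION & SPEC =====
-- A raises IndexError on [] (at A[0]), for N > len(A) (first loop) and for N ≤ -len(A)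
-- (A_rui[N-1]); those inputs are excluded.  Additionally Pre_ excludes the inputs where the
-- conditional shift touches only a proper prefix (0 < N < len(A) and the sorted minimum is
-- negative, i.e. some transformed entry is negative): there the list handed to bisect_left can
-- be unsorted and A's returned value is an artefact of binary search on unsorted data.
def Pre_solve (A : List Int) (N : Int) : Prop :=
  A ≠ [] ∧ 1 - (A.length : Int) ≤ N ∧ N ≤ (A.length : Int) ∧
    (N ≤ 0 ∨ N = (A.length : Int) ∨
      (∀ p ∈ PySem.List.enumerate A 0, if p.1 < N then p.1 + 1 ≤ p.2 else 0 ≤ p.2))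
instance (A : List Int) (N : Int) : Decidable (Pre_solve A N) := by unfold Pre_solve; infer_instance
def pvWitness_solve : List Int × Int := ([3, 1, 2], 3)
def Spec_solve (A : List Int) (N : Int) (out : Int) : Prop := out = solve_alt A N
instance (A : List Int) (N : Int) (out : Int) : Decidable (Spec_solve A N out) := by unfold Spec_solve; infer_instance

-- ===== CLAIM (what is proved, stated in full; the proofs are below) =====
def Claim_equal_solve : Prop := ∀ (A : List Int) (N : Int), Dom_solve A N → Pre_solve A N → Spec_solve A N (solve A N)

-- ===== LEMMAS AND PROOFS =====

theorem length_step1 (A : List Int) (N : Int) : (step1 A N).length = A.length := by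
  unfold step1
  rw [List.length_map, PySem.List.length_enumerate]

theorem length_shiftPrefix (C : List Int) (N : Int) : (shiftPrefix C N).length = C.length := by
  unfold shiftPrefix
  cases h : PySem.List.pyGet? C 0 with
  | none => rfl
  | some c0 =>
      by_cases hc : c0 < 0 <;>
        simp [hc, PySem.List.length_enumerate]

theorem length_prep (A : List Int) (N : Int) : (prep A N).length = A.length := by
  unfold prep
  rw [length_shiftPrefix, PySem.List.length_sorted, length_step1]

-- the conditional shift map is the identity when N ≤ every index …
theorem map_enumerate_id (C : List Int) (c0 N : Int) :
    ∀ s : Int, N ≤ s →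
      (PySem.List.enumerate C s).map (fun p => if p.1 < N then p.2 - c0 else p.2) = C := by
  induction C with
  | nil => intro s _; simp [PySem.List.enumerate_nil]
  | cons a C ih =>
      intro s hs
      rw [PySem.List.enumerate_cons, List.map_cons]
      simp only [if_neg (by omega : ¬ (s < N))]
      rw [ih (s + 1) (by omega)]

-- … and a plain shift of every entry when every index is below N
theorem map_enumerate_all (C : List Int) (c0 N : Int) :
    ∀ s : Int, s + C.length ≤ N →
      (PySem.List.enumerate C s).map (fun p => if p.1 < N then p.2 - c0 else p.2) =
        C.map (fun a => a - c0) := by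
  induction C with
  | nil => intro s _; simp [PySem.List.enumerate_nil]
  | cons a C ih =>
      intro s hs
      rw [PySem.List.enumerate_cons, List.map_cons, List.map_cons]
      simp only [List.length_cons] at hs
      simp only [if_pos (by push_cast at hs ⊢; omega : s < N)]
      rw [ih (s + 1) (by push_cast at hs ⊢; omega)]

-- under Pre_'s disjunction the preprocessed list is sorted
theorem sorted_prep (A : List Int) (N : Int)
    (hdisj : N ≤ 0 ∨ N = (A.length : Int) ∨
      (∀ p ∈ PySem.List.enumerate A 0, if p.1 < N then p.1 + 1 ≤ p.2 else 0 ≤ p.2)) :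
    (prep A N).Pairwise (· ≤ ·) := by
  unfold prep shiftPrefix
  set C := PySem.List.sorted (step1 A N) (fun x => x) false with hC
  have hp : C.Pairwise (· ≤ ·) := PySem.List.sorted_pairwise _ (fun x => x)
  cases h : PySem.List.pyGet? C 0 with
  | none => exact hp
  | some c0 =>
      by_cases hc : c0 < 0
      · simp only [hc, if_true]
        rcases hdisj with hN | hN | hN
        · rw [map_enumerate_id C c0 N 0 hN]; exact hp
        · rw [map_enumerate_all C c0 N 0
            (by rw [hC, PySem.List.length_sorted, length_step1]; omega)]
          rw [List.pairwise_map]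
          exact hp.imp (fun h => by omega)
        · -- no-shift case: c0 is an entry of step1 A N, all of whose entries are ≥ 0
          exfalso
          have hmem : c0 ∈ C := PySem.List.mem_of_pyGet?_eq_some _ h
          rw [hC, PySem.List.mem_sorted] at hmem
          unfold step1 at hmem
          obtain ⟨p, hpmem, hpeq⟩ := List.mem_map.1 hmem
          have := hN p hpmem
          by_cases hlt : p.1 < N
          · rw [if_pos hlt] at this hpeq; omega
          · rw [if_neg hlt] at this hpeq; omega
      · simpa [hc] using hp

-- B's prefix-sum loop builds exactly scanl's tail
theorem scanl_cons_self (x : Int) (l : List Int) :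
    List.scanl (· + ·) x l = x :: (List.scanl (· + ·) x l).tail := by
  cases l <;> simp [List.scanl]

theorem foldP (C : List Int) :
    ∀ (s : Int) (acc : List Int),
      C.foldl (fun st a => (st.1 + a, st.2 ++ [st.1 + a])) (s, acc) =
        (s + C.sum, acc ++ (List.scanl (· + ·) s C).tail) := by
  induction C with
  | nil => intro s acc; simp
  | cons a C ih =>
      intro s acc
      rw [List.foldl_cons]
      dsimp only
      rw [ih (s + a) (acc ++ [s + a]), List.scanl_cons, List.tail_cons,
          scanl_cons_self (s + a) C, List.tail_cons]
      simp only [List.sum_cons, List.append_assoc, List.singleton_append]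
      rw [add_assoc]

-- scanl prefix sums: entry j of scanl (+) s C is s + sum of the first j elements
theorem getD_scanl (C : List Int) (s : Int) (j : Nat) (hj : j ≤ C.length) :
    (C.scanl (· + ·) s).getD j 0 = s + (C.take j).sum := by
  induction C generalizing s j with
  | nil =>
      simp only [List.length_nil, Nat.le_zero] at hj
      subst hj; simp
  | cons a C ih =>
      cases j with
      | zero => simp
      | succ j =>
          rw [List.scanl_cons]
          simp only [List.getD_cons_succ, List.take_succ_cons, List.sum_cons]
          rw [ih (s + a) j (by simpa using hj)]
          ring

-- the cumulative table reads as a prefix sum of the preprocessed list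
theorem getD_Arui (C : List Int) (j : Nat) (hj : j < C.length) :
    ((C.scanl (· + ·) 0).tail).getD j 0 = (C.take (j + 1)).sum := by
  cases C with
  | nil => simp at hj
  | cons a C =>
      rw [List.scanl_cons, List.tail_cons, getD_scanl C (0 + a) j (by simpa using hj)]
      simp [add_comm]

theorem length_Arui (C : List Int) : ((C.scanl (· + ·) 0).tail).length = C.length := by
  rw [List.length_tail, List.length_scanl]
  omega

-- the uniform cost B evaluates at a position
def val (T N : Int) (p : Int × Int) (P : Int) : Int :=
  T - 2 * P + p.2 * (2 * p.1 - N)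

theorem stepB_fst_le (T N : Int) (st : Int × Int) (p : Int × Int) :
    (stepB T N st p).1 ≤ st.1 := by
  unfold stepB; dsimp only; simp

theorem stepB_fst_le_val (T N : Int) (st : Int × Int) (p : Int × Int) :
    (stepB T N st p).1 ≤ val T N p st.2 := by
  unfold stepB val; dsimp only; simp

theorem stepB_fst_cases (T N : Int) (st : Int × Int) (p : Int × Int) :
    (stepB T N st p).1 = st.1 ∨ (stepB T N st p).1 = val T N p st.2 := by
  rcases min_choice st.1 (T - 2 * st.2 + p.2 * (2 * p.1 - N)) with hm | hm
  · left; simp [stepB, hm]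
  · right; simp [stepB, val, hm]

theorem scan_le_init (T N : Int) :
    ∀ (ps : List (Int × Int)) (best P : Int),
      (ps.foldl (stepB T N) (best, P)).1 ≤ best := by
  intro ps
  induction ps with
  | nil => intro best P; simp
  | cons p ps ih =>
      intro best P
      rw [List.foldl_cons]
      exact le_trans (by
        have := ih (stepB T N (best, P) p).1 (stepB T N (best, P) p).2
        simpa using this) (stepB_fst_le T N (best, P) p)

theorem scan_le_val (T N : Int) :
    ∀ (ps : List (Int × Int)) (best P : Int) (k : Nat) (hk : k < ps.length),
      (ps.foldl (stepB T N) (best, P)).1 ≤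
        val T N ps[k] (P + ((ps.take k).map Prod.snd).sum) := by
  intro ps
  induction ps with
  | nil => intro best P k hk; simp at hk
  | cons p ps ih =>
      intro best P k hk
      rw [List.foldl_cons]
      cases k with
      | zero =>
          simp only [List.getElem_cons_zero]
          simp only [List.take_zero, List.map_nil, List.sum_nil, add_zero]
          calc (ps.foldl (stepB T N) (stepB T N (best, P) p)).1
              ≤ (stepB T N (best, P) p).1 := by
                have := scan_le_init T N ps (stepB T N (best, P) p).1 (stepB T N (best, P) p).2
                simpa using this
            _ ≤ val T N p P := stepB_fst_le_val T N (best, P) p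
      | succ k =>
          simp only [List.getElem_cons_succ]
          have := ih (stepB T N (best, P) p).1 (P + p.2) k (by simpa using hk)
          simp only [List.take_succ_cons, List.map_cons, List.sum_cons] at *
          have harr : P + (p.2 + ((ps.take k).map Prod.snd).sum) =
              P + p.2 + ((ps.take k).map Prod.snd).sum := by ring
          rw [harr]
          simpa [stepB] using this

theorem scan_attain (T N : Int) :
    ∀ (ps : List (Int × Int)) (best P : Int),
      (ps.foldl (stepB T N) (best, P)).1 = best ∨
        ∃ k, ∃ hk : k < ps.length,
          (ps.foldl (stepB T N) (best, P)).1 =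
            val T N ps[k] (P + ((ps.take k).map Prod.snd).sum) := by
  intro ps
  induction ps with
  | nil => intro best P; simp
  | cons p ps ih =>
      intro best P
      rw [List.foldl_cons]
      have hstep : stepB T N (best, P) p = ((stepB T N (best, P) p).1, P + p.2) := by
        unfold stepB; dsimp only
      rcases ih (stepB T N (best, P) p).1 (P + p.2) with h | ⟨k, hk, h⟩
      · rw [hstep] at h ⊢
        rcases stepB_fst_cases T N (best, P) p with hc | hc
        · left; rw [h, hc]
        · right
          exact ⟨0, by simp, by simpa using h.trans hc⟩
      · right
        rw [hstep]
        refine ⟨k + 1, by simpa using hk, ?_⟩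
        rw [h]
        simp only [List.take_succ_cons, List.map_cons, List.sum_cons]
        congr 1
        ring

theorem getElem_enumerate (xs : List Int) :
    ∀ (s : Int) (k : Nat) (hk : k < xs.length),
      (PySem.List.enumerate xs s)[k]'(by rw [PySem.List.length_enumerate]; exact hk) =
        (s + (k : Int), xs[k]) := by
  induction xs with
  | nil => intro s k hk; simp at hk
  | cons a xs ih =>
      intro s k hk
      cases k with
      | zero => simp [PySem.List.enumerate_cons]
      | succ k =>
          simp only [PySem.List.enumerate_cons, List.getElem_cons_succ]
          rw [ih (s + 1) k (by simpa using hk)]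
          congr 1
          push_cast
          ring

theorem take_map_snd_enumerate (xs : List Int) :
    ∀ (s : Int) (k : Nat),
      (((PySem.List.enumerate xs s).take k).map Prod.snd) = xs.take k := by
  induction xs with
  | nil => intro s k; simp [PySem.List.enumerate_nil]
  | cons a xs ih =>
      intro s k
      cases k with
      | zero => simp
      | succ k => simp [PySem.List.enumerate_cons, ih (s + 1) k]

-- bisect_left of a member lands on an index holding that value
theorem bisect_mem (L : List Int) (hs : L.Pairwise (· ≤ ·)) (b : Int) (hb : b ∈ L) :
    ∃ hk : PySem.List.bisectLeft L b < L.length,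
      L[PySem.List.bisectLeft L b] = b := by
  obtain ⟨hle, hlt, hge⟩ := PySem.List.bisectLeft_spec L b hs
  set i := PySem.List.bisectLeft L b with hi
  obtain ⟨q, hq, hsq⟩ := List.mem_iff_getElem.1 hb
  have hqi : i ≤ q := by
    by_contra h
    exact absurd (hsq ▸ hlt q hq (by omega)) (lt_irrefl _)
  have hilt : i < L.length := by omega
  have h1 : b ≤ L[i] := hge i hilt (le_refl _)
  have h2 : L[i] ≤ b := by
    rcases Nat.eq_or_lt_of_le hqi with h | h
    · subst h; omega
    · exact hsq ▸ List.pairwise_iff_getElem.1 hs i q hilt hq h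
  exact ⟨hilt, le_antisymm h2 h1⟩

-- a run of equal entries: the prefix sum advances by a multiple of the value
theorem sum_take_of_const (L : List Int) (b : Int) (i : Nat) :
    ∀ j, i ≤ j → j ≤ L.length →
      (∀ k (hk : k < L.length), i ≤ k → k < j → L[k] = b) →
      (L.take j).sum = (L.take i).sum + ((j : Int) - (i : Int)) * b := by
  intro j
  induction j with
  | zero =>
      intro hij _ _
      have : i = 0 := by omega
      subst this; simp
  | succ j ih =>
      intro hij hjl hconst
      rcases Nat.lt_or_ge j i with h | h
      · have : i = j + 1 := by omega
        subst this; simp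
      · have hjlen : j < L.length := by omega
        rw [List.sum_take_succ L j hjlen, ih h (by omega)
          (fun k hk h1 h2 => hconst k hk h1 (by omega)),
          hconst j hjlen h (by omega)]
        push_cast
        ring

-- every position of a value scores the same cost as its bisect_left position
theorem val_shift (L : List Int) (hs : L.Pairwise (· ≤ ·)) (T N : Int) (j : Nat)
    (hj : j < L.length) :
    val T N ((j : Int), L[j]) ((L.take j).sum) =
      val T N (((PySem.List.bisectLeft L L[j] : Nat) : Int), L[j])
        ((L.take (PySem.List.bisectLeft L L[j])).sum) := by
  obtain ⟨hle, hlt, hge⟩ := PySem.List.bisectLeft_spec L L[j] hs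
  set i := PySem.List.bisectLeft L L[j] with hi
  have hij : i ≤ j := by
    by_contra h
    exact absurd (hlt j hj (by omega)) (lt_irrefl _)
  have hconst : ∀ k (hk : k < L.length), i ≤ k → k < j → L[k] = L[j] :=
    fun k hk h1 h2 =>
      le_antisymm (List.pairwise_iff_getElem.1 hs k j hk hj h2) (hge k hk h1)
  rw [sum_take_of_const L L[j] i j hij (by omega) hconst]
  unfold val
  dsimp only
  ring

-- A's branchy candidate formula, as min's second argument
def gA (L : List Int) (T N b : Int) : Int :=
  let i : Int := (PySem.List.bisectLeft L b : Nat)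
  if i > 0 then T - 2 * PySem.List.pyGetD ((L.scanl (· + ·) 0).tail) (i - 1) 0 + b * (2 * i - N)
  else T - b * N

-- … equals the uniform cost at the bisect_left position
theorem gA_eq_val (L : List Int) (T N b : Int)
    (hilt : PySem.List.bisectLeft L b < L.length) :
    gA L T N b =
      val T N (((PySem.List.bisectLeft L b : Nat) : Int), b)
        ((L.take (PySem.List.bisectLeft L b)).sum) := by
  unfold gA val
  set i := PySem.List.bisectLeft L b with hi
  dsimp only
  cases hcase : i with
  | zero => simp [sub_eq_add_neg]
  | succ m =>
      rw [if_pos (by push_cast; omega)]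
      have hc : ((m + 1 : Nat) : Int) - 1 = ((m : Nat) : Int) := by push_cast; ring
      rw [hc, PySem.List.pyGetD_natCast, List.getD_eq_getElem _ 0 (by rw [length_Arui]; omega),
          ← List.getD_eq_getElem _ 0 (by rw [length_Arui]; omega),
          getD_Arui L m (by omega)]

-- fold-min facts for A's loop over the value set
theorem foldl_min_le_init (g : Int → Int) (L : List Int) (init : Int) :
    L.foldl (fun ans b => min ans (g b)) init ≤ init := by
  induction L generalizing init with
  | nil => simp
  | cons a L ih => exact le_trans (ih (min init (g a))) (min_le_left _ _)

theorem foldl_min_le_mem (g : Int → Int) (L : List Int) (b : Int) (hb : b ∈ L) :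
    ∀ init : Int, L.foldl (fun ans b => min ans (g b)) init ≤ g b := by
  induction L with
  | nil => cases hb
  | cons a L ih =>
      intro init
      rcases List.mem_cons.mp hb with h | h
      · subst h; exact le_trans (foldl_min_le_init g L _) (min_le_right _ _)
      · exact ih h _

theorem foldl_min_mem (g : Int → Int) (L : List Int) (init : Int) :
    L.foldl (fun ans b => min ans (g b)) init = init ∨
      ∃ b ∈ L, L.foldl (fun ans b => min ans (g b)) init = g b := by
  induction L generalizing init with
  | nil => simp
  | cons a L ih =>
      rcases ih (min init (g a)) with h | ⟨b, hb, h⟩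
      · rcases min_choice init (g a) with hm | hm
        · exact Or.inl (by simpa [hm] using h)
        · exact Or.inr ⟨a, List.mem_cons_self, by simpa [hm] using h⟩
      · exact Or.inr ⟨b, List.mem_cons_of_mem _ hb, h⟩

-- ===== VERDICT (by name: the statement is the Claim_ definition above) =====
theorem solve_spec : Claim_equal_solve := by
  intro A N _hdom hpre
  obtain ⟨hAne, hlo, hhi, hdisj⟩ := hpre
  unfold Spec_solve solve solve_alt
  dsimp only
  set L := prep A N with hL
  have hlen : L.length = A.length := length_prep A N
  have hn : 0 < L.length := by
    rw [hlen]
    exact List.length_pos_iff.mpr hAne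
  have hs : L.Pairwise (· ≤ ·) := sorted_prep A N hdisj
  -- the set loop is set(L)
  rw [show L.foldl PySem.Set.add (PySem.Set.empty) = PySem.Set.ofList L from
      (PySem.Set.ofList_eq_foldl L).symm]
  -- B's prefix-sum loop builds scanl's tail, so both totals are the same term
  rw [foldP L 0 []]
  simp only [List.nil_append]
  set T := PySem.List.pyGetD ((L.scanl (· + ·) 0).tail) (N - 1) 0 with hT
  -- A's fold body as min against the candidate function gA
  have hbody : (fun (ans b : Int) =>
      let i : Int := (PySem.List.bisectLeft L b : Nat)
      if i > 0 then
        min ans (T - 2 * PySem.List.pyGetD ((L.scanl (· + ·) 0).tail) (i - 1) 0 + b * (2 * i - N))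
      else
        min ans (T - b * N)) = fun ans b => min ans (gA L T N b) := by
    funext ans b
    unfold gA
    dsimp only
    by_cases h : ((PySem.List.bisectLeft L b : Nat) : Int) > 0
    · rw [if_pos h, if_pos h]
    · rw [if_neg h, if_neg h]
  rw [hbody]
  -- the two folds agree
  apply le_antisymm
  · -- A's fold ≤ B's scan
    rcases scan_attain T N (PySem.List.enumerate L 0) INF 0 with h | ⟨k, hk, h⟩
    · rw [h]
      exact foldl_min_le_init (gA L T N) _ INF
    · rw [h]
      have hk' : k < L.length := by
        rw [PySem.List.length_enumerate] at hk; exact hk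
      have hget : (PySem.List.enumerate L 0)[k] = ((k : Int), L[k]) := by
        rw [getElem_enumerate L 0 k hk']
        simp
      rw [hget, take_map_snd_enumerate L 0 k, zero_add]
      obtain ⟨hilt, _⟩ := bisect_mem L hs (L[k]) (List.getElem_mem hk')
      calc (PySem.Set.ofList L).foldl (fun ans b => min ans (gA L T N b)) INF
          ≤ gA L T N (L[k]) := foldl_min_le_mem (gA L T N) _ (L[k])
            ((PySem.Set.mem_ofList L _).mpr (List.getElem_mem hk')) INF
        _ = val T N ((k : Int), L[k]) ((L.take k).sum) := by
            rw [gA_eq_val L T N (L[k]) hilt, ← val_shift L hs T N k hk']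
  · -- B's scan ≤ A's fold
    rcases foldl_min_mem (gA L T N) (PySem.Set.ofList L) INF with h | ⟨b, hb, h⟩
    · rw [h]
      exact scan_le_init T N _ INF 0
    · rw [h]
      have hbL : b ∈ L := (PySem.Set.mem_ofList L b).mp hb
      obtain ⟨hilt, hival⟩ := bisect_mem L hs b hbL
      set i := PySem.List.bisectLeft L b with hi
      rw [gA_eq_val L T N b hilt]
      have hget : (PySem.List.enumerate L 0)[i]'(by rw [PySem.List.length_enumerate]; exact hilt) =
          ((i : Int), L[i]) := by
        rw [getElem_enumerate L 0 i hilt]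
        simp
      have := scan_le_val T N (PySem.List.enumerate L 0) INF 0 i
        (by rw [PySem.List.length_enumerate]; exact hilt)
      rw [hget, take_map_snd_enumerate L 0 i, zero_add, hival] at this
      exact this
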